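-- pv_equiv track=rewrite | github.com/BrunoJAzevedo/LabBio1617 | seq.py | sizeSequence
-- ===== SOURCE A (Python) =====
-- def sizeSequence(tamanho):
--     i=0
--     lista=[]
--     x=[]
--     resultado=[]
--     for i in range (len(tamanho)):
--         x=tamanho[i]
--         lista.extend(x + '-')
--         i+=1
--
--     contador=0
--     for i in range (len(lista)):
--         if (lista[i]!='-'):
--             contador+=1
--
--         else:
--             resultado.append(str(contador))
--             contador=0
--
--     return resultado
-- ===== SOURCE B (Python) =====
-- def sizeSequence(tamanho):
--     resultado = []
--     for s in tamanho:
--         for seg in s.split('-'):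
--             resultado.append(str(len(seg)))
--     return resultado
-- ===== Notes on version B (the rewrite author's own statement) =====
-- stated objective: simpler
-- what changed: Replaces A's two-phase build-a-flattened-char-list-then-count-runs scan with a single per-string pass that delegates segment detection to str.split('-').
import Mathlib
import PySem

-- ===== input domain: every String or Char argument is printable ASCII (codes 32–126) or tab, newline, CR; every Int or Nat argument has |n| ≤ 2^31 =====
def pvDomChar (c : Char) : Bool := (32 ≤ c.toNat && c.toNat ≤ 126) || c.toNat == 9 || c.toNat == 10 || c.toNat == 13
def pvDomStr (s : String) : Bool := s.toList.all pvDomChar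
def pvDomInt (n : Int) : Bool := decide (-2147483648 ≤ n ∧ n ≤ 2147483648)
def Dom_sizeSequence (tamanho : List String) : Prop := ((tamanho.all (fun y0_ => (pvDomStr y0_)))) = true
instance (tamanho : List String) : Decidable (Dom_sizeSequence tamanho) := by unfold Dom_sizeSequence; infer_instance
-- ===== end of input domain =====

-- B replaces A's two-phase flattened-char-list-then-count-runs scan with a per-string split('-') pass; same return value, proved equal.

-- ===== PORT A =====
-- step of A's second loop: contador/resultado state over one character
def pvStepA (st : Int × List String) (c : Char) : Int × List String :=
  if c ≠ '-' then (st.1 + 1, st.2) else (0, st.2 ++ [PySem.Int.toStr st.1])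

def sizeSequence (tamanho : List String) : List String :=
  -- first loop: lista.extend(x + '-') for each x
  let lista : List Char := tamanho.foldl (fun acc x => acc ++ (x.toList ++ ['-'])) []
  -- second loop: count run lengths, appending str(contador) at each '-'
  let st := lista.foldl pvStepA (0, [])
  st.2

-- ===== PORT B =====
-- exact hand port of Python's s.split('-') on a char list (sep is the single char '-'):
-- returns (first segment, remaining segments); the full split is seg :: segs.
def pvSplitDash : List Char → List Char × List (List Char)
  | [] => ([], [])
  | c :: rest =>
    let (seg, segs) := pvSplitDash rest
    if c = '-' then ([], seg :: segs) else (c :: seg, segs)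

def sizeSequence_alt (tamanho : List String) : List String :=
  tamanho.foldl (fun res s =>
    let (seg, segs) := pvSplitDash s.toList
    res ++ (seg :: segs).map (fun t => PySem.Int.toStr (t.length : Int))) []

-- ===== PRECONDITION & SPEC =====
def Spec_sizeSequence (tamanho : List String) (out : List String) : Prop := out = sizeSequence_alt tamanho
instance (tamanho : List String) (out : List String) : Decidable (Spec_sizeSequence tamanho out) := by unfold Spec_sizeSequence; infer_instance

-- ===== CLAIM (what is proved, stated in full; the proofs are below) =====
def Claim_equal_sizeSequence : Prop := ∀ (tamanho : List String), Dom_sizeSequence tamanho → Spec_sizeSequence tamanho (sizeSequence tamanho)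

-- ===== LEMMAS AND PROOFS =====

-- run lengths emitted by A's scan over cs followed by a '-', starting at count cont
def pvLens (cont : Int) : List Char → List String
  | [] => [PySem.Int.toStr cont]
  | c :: rest => if c = '-' then PySem.Int.toStr cont :: pvLens 0 rest else pvLens (cont + 1) rest

theorem pvStepA_run (cs : List Char) : ∀ (cont : Int) (res : List String),
    (cs ++ ['-']).foldl pvStepA (cont, res) = (0, res ++ pvLens cont cs) := by
  induction cs with
  | nil => intro cont res; simp [pvStepA, pvLens]
  | cons c rest ih =>
    intro cont res
    by_cases h : c = '-'
    · subst h
      simp [pvStepA, pvLens, ih 0 (res ++ [PySem.Int.toStr cont])]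
    · simp [pvStepA, pvLens, h, ih (cont + 1) res]

theorem pvLens_eq_split (cs : List Char) : ∀ (cont : Int),
    pvLens cont cs = PySem.Int.toStr (cont + ((pvSplitDash cs).1.length : Int)) ::
      (pvSplitDash cs).2.map (fun t => PySem.Int.toStr (t.length : Int)) := by
  induction cs with
  | nil => intro cont; simp [pvLens, pvSplitDash]
  | cons c rest ih =>
    intro cont
    by_cases h : c = '-'
    · subst h
      simp [pvLens, pvSplitDash, ih 0]
    · simp only [pvLens, pvSplitDash, if_neg h, ih (cont + 1)]
      have : cont + 1 + ((pvSplitDash rest).1.length : Int)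
           = cont + (((c :: (pvSplitDash rest).1).length : Nat) : Int) := by
        simp; ring
      rw [this]

theorem pvScan_flat (ts : List String) : ∀ (res : List String),
    ((ts.flatMap (fun x => x.toList ++ ['-'])).foldl pvStepA (0, res)).2
      = ts.foldl (fun res s =>
          let (seg, segs) := pvSplitDash s.toList
          res ++ (seg :: segs).map (fun t => PySem.Int.toStr (t.length : Int))) res := by
  induction ts with
  | nil => intro res; simp
  | cons s rest ih =>
    intro res
    rw [List.flatMap_cons, List.append_assoc, ← List.append_assoc s.toList, List.foldl_append,
        pvStepA_run, pvLens_eq_split]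
    simp only [List.foldl_cons, ih]
    simp

-- ===== VERDICT (by name: the statement is the Claim_ definition above) =====
theorem sizeSequence_spec : Claim_equal_sizeSequence := by
  intro tamanho _
  show sizeSequence tamanho = sizeSequence_alt tamanho
  unfold sizeSequence sizeSequence_alt
  rw [PySem.List.foldl_append_eq_flatMap]
  simpa using pvScan_flat tamanho []
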